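-- pv_equiv track=rewrite | github.com/GuhanSGCIT/Trees-and-Graphs-problem | Game with Strings.py | deletionsNum
-- ===== SOURCE A (Python) =====
-- from collections import Counter
--
-- def deletionsNum(a,b):
--     a=Counter(a)
--     b=Counter(b)
--     total=0
--     for char in a:
--         if char in b:
--             total+=abs(a[char]-b[char])
--         else:
--             total+=a[char]
--     for char in b:
--         if char not in a:
--             total+=b[char]
--     return total
-- ===== SOURCE B (Python) =====
-- from collections import Counter
--
-- def deletionsNum(a, b):
--     ca = Counter(a)
--     cb = Counter(b)
--     common = sum(min(n, cb[c]) for c, n in ca.items())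
--     return sum(ca.values()) + sum(cb.values()) - 2 * common
-- ===== Notes on version B (the rewrite author's own statement) =====
-- stated objective: simpler
-- what changed: Replaces the two asymmetric key loops (abs-difference for shared keys, raw counts for one-sided keys) by a single overlap sum and the identity deletions = |a| + |b| - 2*|intersection|.
import Mathlib
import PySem

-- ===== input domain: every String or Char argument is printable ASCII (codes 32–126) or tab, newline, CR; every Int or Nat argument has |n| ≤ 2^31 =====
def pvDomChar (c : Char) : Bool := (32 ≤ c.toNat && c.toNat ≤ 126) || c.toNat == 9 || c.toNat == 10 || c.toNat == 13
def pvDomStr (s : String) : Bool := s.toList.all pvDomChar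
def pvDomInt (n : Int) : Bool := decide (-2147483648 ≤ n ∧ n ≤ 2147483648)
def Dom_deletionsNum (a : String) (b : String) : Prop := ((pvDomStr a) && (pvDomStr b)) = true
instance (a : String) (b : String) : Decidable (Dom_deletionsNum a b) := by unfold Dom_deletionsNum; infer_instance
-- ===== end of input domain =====

-- B replaces A's two asymmetric key loops by one overlap sum and the identity
-- deletions = |a| + |b| - 2*|intersection| (objective: simpler).

-- ===== PORT A =====
def deletionsNum (a : String) (b : String) : Int :=
  let ca := PySem.Dict.counter a.toList
  let cb := PySem.Dict.counter b.toList
  let total : Int := 0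
  let total := ca.keys.foldl (fun t ch =>
      if cb.contains ch then t + |ca.getD ch 0 - cb.getD ch 0|
      else t + ca.getD ch 0) total
  let total := cb.keys.foldl (fun t ch =>
      if ca.contains ch then t else t + cb.getD ch 0) total
  total

-- ===== PORT B =====
def deletionsNum_alt (a : String) (b : String) : Int :=
  let ca := PySem.Dict.counter a.toList
  let cb := PySem.Dict.counter b.toList
  let common := (ca.items.map (fun p => min p.2 (cb.getD p.1 0))).sum
  ca.values.sum + cb.values.sum - 2 * common

-- ===== PRECONDITION & SPEC =====
def Spec_deletionsNum (a : String) (b : String) (out : Int) : Prop := out = deletionsNum_alt a b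
instance (a : String) (b : String) (out : Int) : Decidable (Spec_deletionsNum a b out) := by unfold Spec_deletionsNum; infer_instance

-- ===== CLAIM (what is proved, stated in full; the proofs are below) =====
def Claim_equal_deletionsNum : Prop := ∀ (a : String) (b : String), Dom_deletionsNum a b → Spec_deletionsNum a b (deletionsNum a b)

-- ===== LEMMAS AND PROOFS =====

-- a branch-then-accumulate loop is an initial value plus a sum of per-element contributions
theorem pv_foldl_if_add (l : List Char) (t0 : Int) (p : Char → Bool) (u w : Char → Int) :
    l.foldl (fun t ch => if p ch then t + u ch else t + w ch) t0
      = t0 + (l.map (fun ch => if p ch then u ch else w ch)).sum := by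
  induction l generalizing t0 with
  | nil => simp
  | cons x xs ih => simp only [List.foldl_cons, List.map_cons, List.sum_cons, ih]; split <;> ring

theorem pv_foldl_if_skip (l : List Char) (t0 : Int) (p : Char → Bool) (w : Char → Int) :
    l.foldl (fun t ch => if p ch then t else t + w ch) t0
      = t0 + (l.map (fun ch => if p ch then 0 else w ch)).sum := by
  induction l generalizing t0 with
  | nil => simp
  | cons x xs ih => simp only [List.foldl_cons, List.map_cons, List.sum_cons, ih]; split <;> ring

-- Σ_{c∈l} (if p c then f c else 0) = Σ over l.filter p
theorem pv_sum_map_ite {α : Type} (l : List α) (p : α → Prop) [DecidablePred p] (f : α → Int) :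
    (l.map (fun c => if p c then f c else 0)).sum = ((l.filter (fun c => decide (p c))).map f).sum := by
  induction l with
  | nil => simp
  | cons x xs ih =>
    by_cases h : p x <;> simp [List.filter, h, ih]

theorem pv_abs_eq (x y : Int) : |x - y| = x + y - 2 * min x y := by
  rcases le_total x y with h | h
  · rw [abs_of_nonpos (by omega), min_eq_left h]; ring
  · rw [abs_of_nonneg (by omega), min_eq_right h]; ring

-- per-key value of A's first loop, written in B's overlap form
theorem pv_pointwise_a (al bl : List Char) (c : Char) :
    (if bl.contains c then |(al.count c : Int) - (bl.count c : Int)| else (al.count c : Int))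
      = (al.count c : Int) + (if bl.contains c then (bl.count c : Int) else 0)
          - 2 * min (al.count c : Int) (bl.count c : Int) := by
  by_cases h : c ∈ bl
  · simp only [List.contains_iff_mem.mpr h, if_true, pv_abs_eq]
  · have hz : bl.count c = 0 := List.count_eq_zero.mpr h
    have hc : bl.contains c = false := by
      simpa using h
    simp only [hc, Bool.false_eq_true, if_false, hz, Int.natCast_zero,
      min_eq_right (Int.natCast_nonneg (al.count c))]
    ring

-- per-key value of A's second loop
theorem pv_pointwise_b (al bl : List Char) (c : Char) :
    (if al.contains c then 0 else (bl.count c : Int))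
      = (bl.count c : Int) - (if al.contains c then (bl.count c : Int) else 0) := by
  split <;> ring

theorem pv_sum_split (l : List Char) (P Q R : Char → Int) :
    (l.map (fun c => P c + Q c - 2 * R c)).sum
      = (l.map P).sum + (l.map Q).sum - 2 * (l.map R).sum := by
  induction l with
  | nil => simp
  | cons x xs ih => simp only [List.map_cons, List.sum_cons, ih]; ring

theorem pv_sum_sub (l : List Char) (P Q : Char → Int) :
    (l.map (fun c => P c - Q c)).sum = (l.map P).sum - (l.map Q).sum := by
  induction l with
  | nil => simp
  | cons x xs ih => simp only [List.map_cons, List.sum_cons, ih]; ring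

-- the cross sums cancel: Σ_{c ∈ dedup al, c ∈ bl} Y c = Σ_{c ∈ dedup bl, c ∈ al} Y c
theorem pv_cross (al bl : List Char) (Y : Char → Int) :
    ((PySem.Set.ofList al).map (fun c => if bl.contains c then Y c else 0)).sum
      = ((PySem.Set.ofList bl).map (fun c => if al.contains c then Y c else 0)).sum := by
  have h1 : ∀ (u v : List Char) (c : Char),
      (if v.contains c then Y c else 0) = (if c ∈ v then Y c else 0) := by
    intro u v c; by_cases h : c ∈ v <;> simp [h]
  simp only [h1 al bl, h1 bl al]
  rw [pv_sum_map_ite, pv_sum_map_ite]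
  apply List.Perm.sum_eq
  apply List.Perm.map
  rw [List.perm_ext_iff_of_nodup
      (List.Nodup.filter _ (PySem.Set.nodup_ofList al))
      (List.Nodup.filter _ (PySem.Set.nodup_ofList bl))]
  intro c
  simp [List.mem_filter, PySem.Set.mem_ofList, and_comm]

theorem deletionsNum_spec : Claim_equal_deletionsNum := by
  intro a b _
  unfold Spec_deletionsNum deletionsNum deletionsNum_alt
  simp only [PySem.Dict.keys_counter, PySem.Dict.getD_counter, PySem.Dict.contains_counter,
    PySem.Dict.items_counter, PySem.Dict.values, List.map_map]
  rw [pv_foldl_if_add, pv_foldl_if_skip]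
  simp only [pv_pointwise_a a.toList b.toList, pv_pointwise_b a.toList b.toList,
    pv_sum_split, pv_sum_sub]
  rw [pv_cross a.toList b.toList (fun c => (b.toList.count c : Int))]
  simp only [Function.comp_def]
  ring
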